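-- pv_equiv track=rewrite | github.com/ecarg-1/aoc2015 | Day-25/Day25.py | code_num
-- ===== SOURCE A (Python) =====
-- def code_num(row,col): #returns what number code is at a given index
--     cur_row, cur_col, cur_code = 1, 1, 1 #the code at 1,1 is the first code
--     while cur_col < col:
--         cur_col += 1
--         cur_code += cur_col
--     while cur_row < row:
--         cur_code += cur_col + cur_row - 1
--         cur_row += 1
--     return cur_code
-- ===== SOURCE B (Python) =====
-- def code_num(row, col):  # closed-form index of the diagonal code grid (O(1))
--     c = col if col > 1 else 1
--     r = row if row > 1 else 1
--     return c * (c + 1) // 2 + (r - 1) * c + (r - 1) * (r - 2) // 2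
-- ===== Notes on version B (the rewrite author's own statement) =====
-- stated objective: faster
-- what changed: replaced the two counting while-loops by a closed-form triangular-number formula
import Mathlib
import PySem

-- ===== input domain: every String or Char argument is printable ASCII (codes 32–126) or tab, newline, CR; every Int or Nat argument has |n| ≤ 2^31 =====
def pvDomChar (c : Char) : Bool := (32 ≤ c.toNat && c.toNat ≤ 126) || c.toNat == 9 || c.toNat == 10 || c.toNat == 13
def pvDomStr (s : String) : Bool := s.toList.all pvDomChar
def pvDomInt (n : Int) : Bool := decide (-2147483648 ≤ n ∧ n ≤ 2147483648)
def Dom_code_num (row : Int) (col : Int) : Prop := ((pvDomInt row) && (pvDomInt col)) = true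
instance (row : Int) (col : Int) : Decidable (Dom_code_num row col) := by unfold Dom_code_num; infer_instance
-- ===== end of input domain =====

-- B replaces A's two counting while-loops by a closed-form triangular-number formula (O(1) vs O(row+col)).


-- ===== PORT A =====
-- first while loop: while cur_col < col: cur_col += 1; cur_code += cur_col
def codeNumLoopCol (col cur_col cur_code : Int) : Int × Int :=
  if cur_col < col then codeNumLoopCol col (cur_col + 1) (cur_code + (cur_col + 1))
  else (cur_col, cur_code)
termination_by (col - cur_col).toNat
decreasing_by omega

-- second while loop: while cur_row < row: cur_code += cur_col + cur_row - 1; cur_row += 1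
def codeNumLoopRow (row cur_col cur_row cur_code : Int) : Int :=
  if cur_row < row then codeNumLoopRow row cur_col (cur_row + 1) (cur_code + (cur_col + cur_row - 1))
  else cur_code
termination_by (row - cur_row).toNat
decreasing_by omega

def code_num (row : Int) (col : Int) : Int :=
  codeNumLoopRow row (codeNumLoopCol col 1 1).1 1 (codeNumLoopCol col 1 1).2

-- ===== PORT B =====
def code_num_alt (row : Int) (col : Int) : Int :=
  let c : Int := if col > 1 then col else 1
  let r : Int := if row > 1 then row else 1
  PySem.Int.floordiv (c * (c + 1)) 2 + (r - 1) * c + PySem.Int.floordiv ((r - 1) * (r - 2)) 2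

-- ===== PRECONDITION & SPEC =====
def Spec_code_num (row : Int) (col : Int) (out : Int) : Prop := out = code_num_alt row col
instance (row : Int) (col : Int) (out : Int) : Decidable (Spec_code_num row col out) := by unfold Spec_code_num; infer_instance

-- ===== CLAIM (what is proved, stated in full; the proofs are below) =====
def Claim_equal_code_num : Prop := ∀ (row : Int) (col : Int), Dom_code_num row col → Spec_code_num row col (code_num row col)

-- ===== LEMMAS AND PROOFS =====

-- Tri n = 1 + 2 + … + n ;  TriLow m = 0 + 1 + … + (m-1)
def pvTri : Nat → Int
  | 0 => 0
  | n + 1 => pvTri n + (n + 1)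

theorem pvTri_double (n : Nat) : 2 * pvTri n = (n : Int) * (n + 1) := by
  induction n with
  | zero => simp [pvTri]
  | succ n ih => simp only [pvTri]; push_cast; push_cast at ih; ring_nf; ring_nf at ih; omega

def pvTriLow : Nat → Int
  | 0 => 0
  | m + 1 => pvTriLow m + m

theorem pvTriLow_double (m : Nat) : 2 * pvTriLow m = (m : Int) * (m - 1) := by
  induction m with
  | zero => simp [pvTriLow]
  | succ m ih => simp only [pvTriLow]; push_cast; push_cast at ih; ring_nf; ring_nf at ih; omega

theorem fdiv_two_double (t : Int) : PySem.Int.floordiv (2 * t) 2 = t := by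
  rw [PySem.Int.floordiv_eq_ediv_of_pos (by norm_num)]; omega

theorem loopCol_closed (n : Nat) : ∀ (c k : Int),
    codeNumLoopCol (c + n) c k = (c + n, k + n * c + pvTri n) := by
  induction n with
  | zero => intro c k; rw [codeNumLoopCol]; simp [pvTri]
  | succ n ih =>
    intro c k
    rw [codeNumLoopCol]
    have h : c < c + ((n : Int) + 1) := by omega
    push_cast
    rw [if_pos (by push_cast; omega)]
    have := ih (c + 1) (k + (c + 1))
    rw [show c + ((n : Int) + 1) = (c + 1) + (n : Int) by ring, this]
    simp only [Prod.mk.injEq]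
    refine ⟨trivial, ?_⟩
    simp only [pvTri]
    push_cast
    ring

theorem loopCol_stop (col c k : Int) (h : ¬ c < col) : codeNumLoopCol col c k = (c, k) := by
  rw [codeNumLoopCol, if_neg h]

theorem loopRow_closed (m : Nat) : ∀ (cc r k : Int),
    codeNumLoopRow (r + m) cc r k = k + m * (cc + r - 1) + pvTriLow m := by
  induction m with
  | zero => intro cc r k; rw [codeNumLoopRow]; simp [pvTriLow]
  | succ m ih =>
    intro cc r k
    rw [codeNumLoopRow]
    rw [if_pos (by push_cast; omega)]
    have := ih cc (r + 1) (k + (cc + r - 1))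
    rw [show r + ((m : Nat) + 1 : Nat) = (r + 1) + (m : Int) by push_cast; ring] at *
    rw [this]
    simp only [pvTriLow]; push_cast; ring

theorem loopRow_stop (row cc r k : Int) (h : ¬ r < row) : codeNumLoopRow row cc r k = k := by
  rw [codeNumLoopRow, if_neg h]

-- ===== VERDICT (by name: the statement is the Claim_ definition above) =====
theorem code_num_spec : Claim_equal_code_num := by
  intro row col _
  unfold Spec_code_num code_num code_num_alt
  by_cases hc : col > 1
  · obtain ⟨n, hn⟩ : ∃ n : Nat, col = 1 + (n : Int) := ⟨(col - 1).toNat, by omega⟩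
    subst hn
    rw [loopCol_closed n 1 1]
    simp only [if_pos hc]
    have h1 : (1 + (n : Int)) * ((1 + (n : Int)) + 1) = 2 * pvTri (n + 1) := by
      have := pvTri_double (n + 1); push_cast at this; linear_combination -this
    rw [h1, fdiv_two_double]
    by_cases hr : row > 1
    · obtain ⟨m, hm⟩ : ∃ m : Nat, row = 1 + (m : Int) := ⟨(row - 1).toNat, by omega⟩
      subst hm
      rw [loopRow_closed m _ 1 _]
      simp only [if_pos hr]
      have h2 : ((1 + (m : Int)) - 1) * ((1 + (m : Int)) - 2) = 2 * pvTriLow m := by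
        have := pvTriLow_double m; push_cast at this; linear_combination -this
      rw [h2, fdiv_two_double]
      simp only [pvTri]
      push_cast
      ring
    · rw [loopRow_stop _ _ _ _ (by omega)]
      simp only [if_neg hr]
      have h2 : ((1 : Int) - 1) * ((1 : Int) - 2) = 2 * 0 := by ring
      rw [h2, fdiv_two_double]
      simp only [pvTri]
      ring
  · rw [loopCol_stop _ _ _ (by omega)]
    simp only [if_neg hc]
    have h1 : ((1 : Int)) * ((1 : Int) + 1) = 2 * 1 := by ring
    rw [h1, fdiv_two_double]
    by_cases hr : row > 1
    · obtain ⟨m, hm⟩ : ∃ m : Nat, row = 1 + (m : Int) := ⟨(row - 1).toNat, by omega⟩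
      subst hm
      rw [loopRow_closed m _ 1 _]
      simp only [if_pos hr]
      have h2 : ((1 + (m : Int)) - 1) * ((1 + (m : Int)) - 2) = 2 * pvTriLow m := by
        have := pvTriLow_double m; push_cast at this; linear_combination -this
      rw [h2, fdiv_two_double]
      push_cast
      ring
    · rw [loopRow_stop _ _ _ _ (by omega)]
      simp only [if_neg hr]
      have h2 : ((1 : Int) - 1) * ((1 : Int) - 2) = 2 * 0 := by ring
      rw [h2, fdiv_two_double]
      ring
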